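-- pv_equiv track=rewrite | github.com/jh27kim/Algorithm | BallonBlowing.py | solution
-- ===== SOURCE A (Python) =====
-- from heapq import nsmallest
--
-- def second_smallest(numbers, n):
--     return nsmallest(n, numbers)[-1]
--
-- def solution(a):
--     answer = 2
--     if len(a) == 1 or len(a) == 2:
--         return len(a)
--     for i in range(1, len(a)-1):
--         #왼쪽 > i < 오른쪽 가능
--         secondLeft = second_smallest(a[:i], 2)
--         secondRight = second_smallest(a[i+1:], 2)
--         firstLeft = second_smallest(a[:i], 1)
--         firstRight = second_smallest(a[i + 1:], 1)
--
--         if secondLeft > a[i] and a[i] < firstRight: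
--             answer += 1
--             continue
--         if firstLeft > a[i] and a[i] < secondRight:
--             answer += 1
--             continue
--
--         # 왼쪽 > i > 오른쪽 & 기회 1 가능
--         if firstLeft > a[i] > firstRight:
--             answer += 1
--             continue
--         if firstLeft > a[i] > firstRight:
--             answer += 1
--             continue
--
--         #왼쪽 < i < 오른쪽 & 기회 1 가능
--         if firstLeft < a[i] < firstRight:
--             answer += 1
--             continue
--         if firstLeft < a[i] < firstRight:
--             answer += 1
--             continue
--     return answer
-- ===== SOURCE B (Python) =====
-- def solution(a):
--     n = len(a)
--     if n <= 2:
--         return n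
--     # pre[k] = (min, second-min or None) of a[:k+1], built in one left pass
--     pre = []
--     m1, m2 = a[0], None
--     pre.append((m1, m2))
--     for y in a[1:]:
--         if y < m1:
--             m1, m2 = y, m1
--         elif m2 is None or y < m2:
--             m2 = y
--         pre.append((m1, m2))
--     # suf[j] = (min, second-min or None) of a[j:], built in one right pass
--     suf = [None] * n
--     m1, m2 = a[n - 1], None
--     suf[n - 1] = (m1, m2)
--     for j in range(n - 2, -1, -1):
--         y = a[j]
--         if y < m1:
--             m1, m2 = y, m1
--         elif m2 is None or y < m2:
--             m2 = y
--         suf[j] = (m1, m2)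
--     answer = 2
--     for i in range(1, n - 1):
--         x = a[i]
--         fL, sL = pre[i - 1]
--         if sL is None:
--             sL = fL
--         fR, sR = suf[i + 1]
--         if sR is None:
--             sR = fR
--         if (sL > x < fR) or (fL > x < sR) or (fL > x > fR) or (fL < x < fR):
--             answer += 1
--     return answer
-- ===== Notes on version B (the rewrite author's own statement) =====
-- stated objective: faster
-- what changed: Replaces the per-index heapq.nsmallest calls over both slices with one left pass and one right pass that maintain running (smallest, second-smallest) prefix/suffix states, read in O(1) per index.
-- intended difference: On the empty list A returns its never-reset initial counter 2 although there are no balloon positions at all; B returns 0, the intended count. — e.g. on solution([]): A returns 2, B returns 0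
import Mathlib
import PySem

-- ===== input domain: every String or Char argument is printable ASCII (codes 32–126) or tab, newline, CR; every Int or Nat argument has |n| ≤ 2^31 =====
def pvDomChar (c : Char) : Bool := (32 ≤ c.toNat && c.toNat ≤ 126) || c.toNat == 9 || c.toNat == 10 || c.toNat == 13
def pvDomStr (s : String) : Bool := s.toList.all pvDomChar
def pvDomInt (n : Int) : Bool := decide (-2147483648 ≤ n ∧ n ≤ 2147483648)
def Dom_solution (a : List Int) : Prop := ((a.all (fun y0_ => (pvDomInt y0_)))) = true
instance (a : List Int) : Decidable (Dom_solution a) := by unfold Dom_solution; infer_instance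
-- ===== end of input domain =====

-- B replaces A's per-index heapq.nsmallest over both slices with one left and one right pass
-- maintaining running (smallest, second-smallest) prefix/suffix states read in O(1) per index.

-- ===== PORT A =====
-- second_smallest(numbers, n) = nsmallest(n, numbers)[-1]; the [-1] (getLast?) is only ever
-- taken on a nonempty list in A's calls, so the .getD 0 default is never used.
def secondSmallest (numbers : List Int) (n : Int) : Int :=
  (PySem.List.pyGet? ((PySem.List.sorted numbers (fun x => x) false).take n.toNat) (-1)).getD 0

def solution (a : List Int) : Int :=
  if a.length = 1 ∨ a.length = 2 then (a.length : Int)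
  else
    (PySem.List.pyRange 1 ((a.length : Int) - 1) 1).foldl (fun answer i =>
      let secondLeft := secondSmallest (PySem.List.slice a none (some i)) 2
      let secondRight := secondSmallest (PySem.List.slice a (some (i + 1)) none) 2
      let firstLeft := secondSmallest (PySem.List.slice a none (some i)) 1
      let firstRight := secondSmallest (PySem.List.slice a (some (i + 1)) none) 1
      let ai := (PySem.List.pyGet? a i).getD 0
      if secondLeft > ai ∧ ai < firstRight then answer + 1
      else if firstLeft > ai ∧ ai < secondRight then answer + 1
      else if firstLeft > ai ∧ ai > firstRight then answer + 1
      else if firstLeft > ai ∧ ai > firstRight then answer + 1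
      else if firstLeft < ai ∧ ai < firstRight then answer + 1
      else if firstLeft < ai ∧ ai < firstRight then answer + 1
      else answer) 2

-- ===== PORT B =====
-- running state: (smallest so far, second-smallest so far or none if only one element seen)
def pvStep (s : Int × Option Int) (y : Int) : Int × Option Int :=
  if y < s.1 then (y, some s.1)
  else
    match s.2 with
    | none => (s.1, some y)
    | some m2 => if y < m2 then (s.1, some y) else (s.1, some m2)

def solution_alt (a : List Int) : Int :=
  if a.length ≤ 2 then (a.length : Int)
  else
    match a with
    | [] => 0
    | x :: xs =>
      -- pre[k] = state of a[:k+1] (python's append loop = scanl)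
      let pre := List.scanl pvStep (x, none) xs
      -- right pass: start at a[-1], fold a[:-1] reversed; suf[j] = state of a[j:]
      let z := (PySem.List.pyGet? a (-1)).getD 0
      let suf := (List.scanl pvStep (z, none) a.dropLast.reverse).reverse
      (PySem.List.pyRange 1 ((a.length : Int) - 1) 1).foldl (fun answer i =>
        let xv := (PySem.List.pyGet? a i).getD 0
        let pL := (PySem.List.pyGet? pre (i - 1)).getD (0, none)
        let fL := pL.1
        let sL := pL.2.getD fL
        let pR := (PySem.List.pyGet? suf (i + 1)).getD (0, none)
        let fR := pR.1
        let sR := pR.2.getD fR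
        if (sL > xv ∧ xv < fR) ∨ (fL > xv ∧ xv < sR) ∨ (fL > xv ∧ xv > fR) ∨ (fL < xv ∧ xv < fR)
        then answer + 1 else answer) 2

-- ===== PRECONDITION & SPEC =====
-- On the empty list A returns its never-reset initial counter 2 although there are no balloon
-- positions at all; B returns 0, the intended count.
def D_solution (a : List Int) : Prop := a = []
instance (a : List Int) : Decidable (D_solution a) := by unfold D_solution; infer_instance

def Spec_solution (a : List Int) (out : Int) : Prop := ¬ D_solution a → out = solution_alt a
instance (a : List Int) (out : Int) : Decidable (Spec_solution a out) := by unfold Spec_solution; infer_instance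

def pvDiffWitness_solution : List Int := []
def pvDiffWitnessOut_solution : Int × Int := (2, 0)

-- ===== CLAIM (what is proved, stated in full; the proofs are below) =====
def Claim_unchanged_solution : Prop := ∀ (a : List Int), Dom_solution a → Spec_solution a (solution a)
def Claim_changed_solution : Prop := Dom_solution (pvDiffWitness_solution) ∧ D_solution (pvDiffWitness_solution) ∧ solution (pvDiffWitness_solution) = pvDiffWitnessOut_solution.1 ∧ solution_alt (pvDiffWitness_solution) = pvDiffWitnessOut_solution.2 ∧ pvDiffWitnessOut_solution.1 ≠ pvDiffWitnessOut_solution.2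
def Claim_exact_solution : Prop := ∀ (a : List Int), Dom_solution a → D_solution a → solution a ≠ solution_alt a

-- ===== LEMMAS AND PROOFS =====

-- invariant of the running state over a processed nonempty prefix p
def pvInv (p : List Int) (s : Int × Option Int) : Prop :=
  s.1 ∈ p ∧ (∀ y ∈ p, s.1 ≤ y) ∧
    (match s.2 with
     | none => p.length = 1
     | some m => m ∈ p.erase s.1 ∧ ∀ y ∈ p.erase s.1, m ≤ y)

theorem scanl_take {α β : Type} (f : β → α → β) (b : β) (l : List α) (k : Nat)
    (hk : k ≤ l.length) :
    (List.scanl f b l)[k]? = some (List.foldl f b (l.take k)) := by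
  induction l generalizing b k with
  | nil =>
    have : k = 0 := by simpa using hk
    subst this; simp [List.scanl_nil]
  | cons x xs ih =>
    cases k with
    | zero => simp [List.scanl_cons]
    | succ k =>
      rw [List.scanl_cons]
      simpa using ih (f b x) k (by simpa using hk)

theorem pvInv_step (p : List Int) (s : Int × Option Int) (y : Int)
    (h : pvInv p s) : pvInv (p ++ [y]) (pvStep s y) := by
  obtain ⟨m1, m2?⟩ := s
  obtain ⟨hm1, hle, h2⟩ := h
  by_cases hy : y < m1
  · have hstep : pvStep (m1, m2?) y = (y, some m1) := by simp [pvStep, hy]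
    rw [hstep]
    have hnotin : y ∉ p := fun hin => absurd (hle y hin) (by omega)
    have herase : (p ++ [y]).erase y = p := by
      rw [List.erase_append_right _ hnotin]; simp
    refine ⟨by simp, ?_, ?_⟩
    · intro z hz
      rcases List.mem_append.1 hz with hz | hz
      · exact le_of_lt (lt_of_lt_of_le hy (hle z hz))
      · simp at hz; omega
    · simpa [herase] using ⟨hm1, hle⟩
  · cases m2? with
    | none =>
      have hstep : pvStep (m1, none) y = (m1, some y) := by simp [pvStep, hy]
      rw [hstep]
      have hp : p = [m1] := by
        match p, h2 with
        | [z], _ => simp_all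
      subst hp
      refine ⟨by simp, ?_, ?_⟩
      · intro z hz; simp at hz; rcases hz with h | h <;> omega
      · simp
    | some m2 =>
      obtain ⟨hm2, hle2⟩ := h2
      have herase : (p ++ [y]).erase m1 = p.erase m1 ++ [y] :=
        List.erase_append_left _ hm1
      by_cases hy2 : y < m2
      · have hstep : pvStep (m1, some m2) y = (m1, some y) := by simp [pvStep, hy, hy2]
        rw [hstep]
        refine ⟨List.mem_append_left _ hm1, ?_, ?_⟩
        · intro z hz
          rcases List.mem_append.1 hz with hz | hz
          · exact hle z hz
          · simp at hz; omega
        · refine ⟨?_, ?_⟩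
          · simp only [herase]; exact List.mem_append_right _ (by simp)
          · simp only [herase]
            intro z hz
            rcases List.mem_append.1 hz with hz | hz
            · exact le_of_lt (lt_of_lt_of_le hy2 (hle2 z hz))
            · simp at hz; omega
      · have hstep : pvStep (m1, some m2) y = (m1, some m2) := by simp [pvStep, hy, hy2]
        rw [hstep]
        refine ⟨List.mem_append_left _ hm1, ?_, ?_⟩
        · intro z hz
          rcases List.mem_append.1 hz with hz | hz
          · exact hle z hz
          · simp at hz
            have := hle2  -- m1 ≤ y from hy
            omega
        · refine ⟨?_, ?_⟩
          · simp only [herase]; exact List.mem_append_left _ hm2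
          · simp only [herase]
            intro z hz
            rcases List.mem_append.1 hz with hz | hz
            · exact hle2 z hz
            · simp at hz; omega

theorem pvInv_fold (x : Int) (xs : List Int) :
    pvInv (x :: xs) (List.foldl pvStep (x, none) xs) := by
  induction xs using List.reverseRecOn with
  | nil => exact ⟨by simp, by simp, rfl⟩
  | append_singleton ys y ih =>
    rw [List.foldl_append]
    have := pvInv_step (x :: ys) _ y ih
    simpa using this

theorem ss_perm (p q : List Int) (n : Int) (h : p.Perm q) :
    secondSmallest p n = secondSmallest q n := by
  unfold secondSmallest
  rw [PySem.List.sorted_eq_sorted_of_perm p q (fun x => x) (fun _ _ h => h) h]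

-- head of sorted equals the fold's min

theorem sorted_head_eq (x : Int) (xs : List Int) (m : Int) (t : List Int)
    (hS : PySem.List.sorted (x :: xs) (fun x => x) false = m :: t) :
    m = (List.foldl pvStep (x, none) xs).1 := by
  obtain ⟨hmem, hle, -⟩ := pvInv_fold x xs
  have hmS : m ∈ x :: xs := by
    rw [← PySem.List.mem_sorted (key := fun x => x) (rev := false), hS]; simp
  have h1 : ∀ y ∈ x :: xs, m ≤ y := PySem.List.key_head_sorted_le _ _ hS
  exact le_antisymm (h1 _ hmem) (hle m hmS)

theorem ss1_eq (x : Int) (xs : List Int) :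
    secondSmallest (x :: xs) 1 = (List.foldl pvStep (x, none) xs).1 := by
  obtain ⟨m, t, hS⟩ : ∃ m t, PySem.List.sorted (x :: xs) (fun x => x) false = m :: t := by
    cases hS : PySem.List.sorted (x :: xs) (fun x => x) false with
    | nil => exact absurd hS (by simp [PySem.List.sorted_eq_nil_iff])
    | cons m t => exact ⟨m, t, rfl⟩
  unfold secondSmallest
  rw [hS]
  simpa using sorted_head_eq x xs m t hS

theorem ss2_eq (x : Int) (xs : List Int) :
    secondSmallest (x :: xs) 2 =
      ((List.foldl pvStep (x, none) xs).2.getD (List.foldl pvStep (x, none) xs).1) := by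
  cases xs with
  | nil =>
    have : PySem.List.sorted [x] (fun x => x) false = [x] :=
      PySem.List.sorted_eq_self_of_pairwise _ _ (by simp)
    simp [secondSmallest, this, List.foldl, PySem.List.pyGet?_neg_one]
  | cons x' xs' =>
    set F := List.foldl pvStep (x, none) (x' :: xs') with hF
    obtain ⟨hmem, hle, h2⟩ := pvInv_fold x (x' :: xs')
    obtain ⟨m, u, t, hS⟩ : ∃ m u t,
        PySem.List.sorted (x :: x' :: xs') (fun x => x) false = m :: u :: t := by
      have hlen : (PySem.List.sorted (x :: x' :: xs') (fun x => x) false).length =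
          xs'.length + 2 := by simp [PySem.List.length_sorted]
      cases hS : PySem.List.sorted (x :: x' :: xs') (fun x => x) false with
      | nil => rw [hS] at hlen; simp at hlen
      | cons m rest =>
        cases rest with
        | nil => rw [hS] at hlen; simp at hlen
        | cons u t => exact ⟨m, u, t, rfl⟩
    have hm : m = F.1 := sorted_head_eq x (x' :: xs') m (u :: t) hS
    -- F.2 is some
    obtain ⟨m2, hm2eq⟩ : ∃ m2, F.2 = some m2 := by
      cases hF2 : F.2 with
      | none =>
        rw [hF2] at h2
        simp at h2
      | some m2 => exact ⟨m2, rfl⟩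
    rw [hm2eq] at h2
    obtain ⟨hm2mem, hm2le⟩ := h2
    -- permutation to the erased list
    have hperm : (u :: t).Perm ((x :: x' :: xs').erase m) := by
      have h1 : (m :: u :: t).Perm (x :: x' :: xs') := by
        rw [← hS]; exact PySem.List.sorted_perm _ _ _
      have hmS : m ∈ x :: x' :: xs' := h1.mem_iff.1 (by simp)
      have h3 := List.perm_cons_erase hmS
      exact (h1.trans h3).cons_inv
    have hpw : (m :: u :: t).Pairwise (fun a b => a ≤ b) := by
      have := PySem.List.sorted_pairwise (x :: x' :: xs') (fun x => x)
      rw [hS] at this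
      exact this
    have humin : ∀ z ∈ (x :: x' :: xs').erase m, u ≤ z := by
      intro z hz
      have hz' : z ∈ u :: t := hperm.mem_iff.2 hz
      rcases List.mem_cons.1 hz' with rfl | hz'
      · exact le_refl _
      · exact ((List.pairwise_cons.1 (List.pairwise_cons.1 hpw).2).1) z hz'
    have hu : u = m2 := by
      rw [hm] at hperm humin
      exact le_antisymm (humin m2 hm2mem) (hm2le u (hperm.mem_iff.1 (by simp)))
    unfold secondSmallest
    rw [hS, hm2eq]
    simpa using hu

-- ===== VERDICT (by name: the statement is the Claim_ definition above) =====
theorem solution_spec : Claim_unchanged_solution := by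
  intro a _ hnd
  unfold D_solution at hnd
  cases a with
  | nil => exact absurd rfl hnd
  | cons x xs =>
    by_cases hsmall : xs.length + 1 ≤ 2
    · unfold solution solution_alt
      rw [if_pos (by simp only [List.length_cons]; omega),
        if_pos (by simp only [List.length_cons]; omega)]
    · unfold solution solution_alt
      rw [if_neg (by simp only [List.length_cons]; omega),
        if_neg (by simp only [List.length_cons]; omega)]
      apply PySem.List.foldl_congr_mem
      intro acc i hi
      dsimp only
      rw [PySem.List.mem_pyRange_one] at hi
      simp only [List.length_cons] at hi
      obtain ⟨k', hk'⟩ : ∃ k', i = ((k' + 1 : Nat) : Int) :=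
        ⟨(i.toNat - 1), by omega⟩
      subst hk'
      have hkx : k' + 2 ≤ xs.length := by omega
      -- left slice and prefix lookup
      have hsliceL : PySem.List.slice (x :: xs) none (some ((k' + 1 : Nat) : Int))
          = x :: xs.take k' := by
        rw [PySem.List.slice_to_natCast]
        simp [List.take_succ_cons]
      have hpreL : PySem.List.pyGet? (List.scanl pvStep (x, none) xs)
            (((k' + 1 : Nat) : Int) - 1)
          = some (List.foldl pvStep (x, (none : Option Int)) (xs.take k')) := by
        have h1 : ((k' + 1 : Nat) : Int) - 1 = ((k' : Nat) : Int) := by push_cast; ring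
        rw [h1, PySem.List.pyGet?_natCast, scanl_take _ _ _ _ (by omega)]
      -- right slice and suffix lookup
      have hsliceR : PySem.List.slice (x :: xs) (some (((k' + 1 : Nat) : Int) + 1)) none
          = (x :: xs).drop (k' + 2) := by
        have h1 : ((k' + 1 : Nat) : Int) + 1 = ((k' + 2 : Nat) : Int) := by push_cast; ring
        rw [h1, PySem.List.slice_from_natCast]
      have hne : (x :: xs) ≠ [] := by simp
      have hz : PySem.List.pyGet? (x :: xs) (-1) = some ((x :: xs).getLast hne) := by
        rw [PySem.List.pyGet?_neg_one, List.getLast?_eq_getLast]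
      have hrev : (x :: xs).reverse
          = (x :: xs).getLast hne :: (x :: xs).dropLast.reverse := by
        conv_lhs => rw [← List.dropLast_append_getLast hne]
        rw [List.reverse_append]; simp
      have hLlen : (x :: xs).dropLast.reverse.length = xs.length := by simp
      have hsufR : PySem.List.pyGet?
            (List.scanl pvStep ((x :: xs).getLast hne, none)
              (x :: xs).dropLast.reverse).reverse (((k' + 1 : Nat) : Int) + 1)
          = some (List.foldl pvStep ((x :: xs).getLast hne, (none : Option Int))
              ((x :: xs).dropLast.reverse.take (xs.length - (k' + 2)))) := by
        have h1 : ((k' + 1 : Nat) : Int) + 1 = ((k' + 2 : Nat) : Int) := by push_cast; ring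
        rw [h1, PySem.List.pyGet?_natCast]
        rw [List.getElem?_reverse (by rw [List.length_scanl, hLlen]; omega)]
        rw [List.length_scanl, hLlen]
        have h2 : xs.length + 1 - 1 - (k' + 2) = xs.length - (k' + 2) := by omega
        rw [h2, scanl_take _ _ _ _ (by omega)]
      have hdropR : ((x :: xs).drop (k' + 2)).reverse
          = (x :: xs).getLast hne :: (x :: xs).dropLast.reverse.take (xs.length - (k' + 2)) := by
        rw [List.reverse_drop, hrev]
        have h1 : (x :: xs).length - (k' + 2) = (xs.length - (k' + 2)) + 1 := by
          simp; omega
        rw [h1, List.take_succ_cons]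
      have hssR : ∀ nn : Int, secondSmallest ((x :: xs).drop (k' + 2)) nn
          = secondSmallest ((x :: xs).getLast hne
              :: (x :: xs).dropLast.reverse.take (xs.length - (k' + 2))) nn := by
        intro nn
        rw [← hdropR]
        exact ss_perm _ _ nn (List.reverse_perm _).symm
      -- rewrite both bodies to the same values
      simp only [hsliceL, hsliceR, hpreL, hz, hsufR, hssR, ss1_eq, ss2_eq,
        Option.getD_some]
      set pL := List.foldl pvStep (x, (none : Option Int)) (xs.take k') with hpL
      set pR := List.foldl pvStep ((x :: xs).getLast hne, (none : Option Int))
        ((x :: xs).dropLast.reverse.take (xs.length - (k' + 2))) with hpR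
      set xv := (PySem.List.pyGet? (x :: xs) ((k' + 1 : Nat) : Int)).getD 0 with hxv
      clear_value pL pR xv
      clear hpL hpR hxv hpreL hsufR hssR hdropR hsliceL hsliceR hz hrev hLlen hi hkx hsmall hnd
      generalize pL.2.getD pL.1 = sL
      generalize pR.2.getD pR.1 = sR
      generalize pL.1 = fL
      generalize pR.1 = fR
      split_ifs <;> omega

theorem solution_changed : Claim_changed_solution := by
  unfold Claim_changed_solution; decide

theorem solution_tight : Claim_exact_solution := by
  intro a _ hd
  unfold D_solution at hd; subst hd; decide
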